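-- pv_equiv track=rewrite | github.com/HuXiaoyu-TJU/A-comprehensive-landscape-of-human-organ-N-glycoproteome | for_sameID/pGlyco_forsameID.py | rename_sugars
-- ===== SOURCE A (Python) =====
-- def rename_sugars(comp):
--     sugar_names = {
--         'H(': 'Hex(',
--         'N(': 'HexNAc(',
--         'F(': 'Fuc(',
--         'A(': 'NeuAc('
--     }
--     for old, new in sugar_names.items():
--         comp = comp.replace(old, new)
--     return comp
-- ===== SOURCE B (Python) =====
-- def rename_sugars(comp):
--     sugar_names = {
--         'H(': 'Hex(',
--         'N(': 'HexNAc(',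
--         'F(': 'Fuc(',
--         'A(': 'NeuAc('
--     }
--     out = []
--     i = 0
--     while i < len(comp):
--         rep = sugar_names.get(comp[i:i + 2])
--         if rep is not None:
--             out.append(rep)
--             i += 2
--         else:
--             out.append(comp[i])
--             i += 1
--     return ''.join(out)
-- ===== Notes on version B (the rewrite author's own statement) =====
-- stated objective: alternative
-- what changed: Replaces four sequential full-string .replace passes by one left-to-right scan that looks each two-character window up in the abbreviation dict once (valid because no expansion reintroduces a pattern).
import Mathlib
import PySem

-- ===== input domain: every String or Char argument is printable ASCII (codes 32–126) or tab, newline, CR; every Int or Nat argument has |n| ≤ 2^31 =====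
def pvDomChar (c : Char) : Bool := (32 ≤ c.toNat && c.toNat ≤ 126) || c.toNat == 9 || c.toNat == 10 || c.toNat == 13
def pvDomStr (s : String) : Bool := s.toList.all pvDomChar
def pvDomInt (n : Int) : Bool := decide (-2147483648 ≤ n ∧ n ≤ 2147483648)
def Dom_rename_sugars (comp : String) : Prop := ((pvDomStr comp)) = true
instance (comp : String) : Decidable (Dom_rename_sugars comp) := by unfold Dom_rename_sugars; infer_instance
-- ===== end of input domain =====

-- B replaces A's four sequential .replace passes by one left-to-right scan with a dict
-- lookup on each two-character window (alternative decomposition, same results).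

-- ===== PORT A =====
-- A: four sequential str.replace passes, in dict insertion order.
def rename_sugars (comp : String) : String :=
  let comp := PySem.Str.replace comp "H(" "Hex("
  let comp := PySem.Str.replace comp "N(" "HexNAc("
  let comp := PySem.Str.replace comp "F(" "Fuc("
  let comp := PySem.Str.replace comp "A(" "NeuAc("
  comp

-- ===== PORT B =====
-- Source B's dict, keyed by the two-character windows (strings as List Char, the Chars layer).
def sugarNames : PySem.Dict (List Char) (List Char) :=
  PySem.Dict.mk [(['H', '('], "Hex(".toList), (['N', '('], "HexNAc(".toList),
                 (['F', '('], "Fuc(".toList), (['A', '('], "NeuAc(".toList)]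

-- Source B's while loop: look up comp[i:i+2]; on a hit append the expansion and skip 2, else copy one char.
def renameScan : List Char → List Char
  | [] => []
  | c :: t =>
    match sugarNames.get? (c :: t.take 1) with
    | some r => r ++ renameScan (t.drop 1)
    | none => c :: renameScan t
termination_by l => l.length
decreasing_by
  · simp only [List.length_cons, List.length_drop]; omega
  · simp

def rename_sugars_alt (comp : String) : String :=
  String.ofList (renameScan comp.toList)

-- ===== PRECONDITION & SPEC =====
def Spec_rename_sugars (comp : String) (out : String) : Prop := out = rename_sugars_alt comp
instance (comp : String) (out : String) : Decidable (Spec_rename_sugars comp out) := by unfold Spec_rename_sugars; infer_instance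

-- ===== CLAIM (what is proved, stated in full; the proofs are below) =====
def Claim_equal_rename_sugars : Prop := ∀ (comp : String), Dom_rename_sugars comp → Spec_rename_sugars comp (rename_sugars comp)

-- ===== LEMMAS AND PROOFS =====

-- Structural form of one replace pass with a two-character pattern [x, '(']: at each
-- position, if the pattern starts here consume it and emit `new`, else copy one char.
def repP (x : Char) (new : List Char) : List Char → List Char
  | [] => []
  | c :: t =>
    if c = x ∧ t.head? = some '(' then new ++ repP x new (t.drop 1)
    else c :: repP x new t
termination_by l => l.length
decreasing_by
  · simp only [List.length_cons, List.length_drop]; omega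
  · simp

lemma repP_go (x : Char) (new : List Char) :
    ∀ (fuel : Nat) (l acc : List Char), l.length ≤ fuel →
      PySem.Chars.replace.go [x, '('] new fuel l acc = acc.reverse ++ repP x new l := by
  intro fuel
  induction fuel with
  | zero =>
    intro l acc h
    have : l = [] := List.eq_nil_of_length_eq_zero (Nat.le_zero.mp h)
    subst this
    simp [PySem.Chars.replace.go, repP]
  | succ n ih =>
    intro l acc h
    cases l with
    | nil => simp [PySem.Chars.replace.go, repP]
    | cons c t =>
      simp only [PySem.Chars.replace.go]
      by_cases hp : [x, '('].isPrefixOf (c :: t) = true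
      · rw [if_pos hp]
        have hc : c = x ∧ t.head? = some '(' := by
          cases t with
          | nil => simp [List.isPrefixOf] at hp
          | cons d t' =>
            simp [List.isPrefixOf] at hp
            exact ⟨hp.1.symm, by simp [hp.2.symm]⟩
        obtain ⟨d, t', rfl⟩ : ∃ d t', t = d :: t' := by
          cases t with
          | nil => simp at hc
          | cons d t' => exact ⟨d, t', rfl⟩
        rw [ih _ _ (by simp at h ⊢; omega)]
        rw [repP, if_pos hc]
        simp
      · rw [if_neg hp]
        rw [ih _ _ (by simp at h ⊢; omega)]
        have hc : ¬ (c = x ∧ t.head? = some '(') := by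
          intro ⟨h1, h2⟩
          cases t with
          | nil => simp at h2
          | cons d t' =>
            simp at h2
            simp [List.isPrefixOf, h1, h2] at hp
        rw [repP, if_neg hc]
        simp

lemma replace_eq_repP (x : Char) (new l : List Char) :
    PySem.Chars.replace l [x, '('] new = repP x new l := by
  rw [PySem.Chars.replace]
  simp only [List.isEmpty_cons, if_false, Bool.false_eq_true]
  simpa using repP_go x new l.length l [] le_rfl

-- head preservation: a pass whose replacement does not start with '(' never makes the
-- string start with '(' unless it already did.
lemma repP_head_ne (x : Char) (new t : List Char) (hne : new ≠ [])
    (hnew : new.head? ≠ some '(') (ht : t.head? ≠ some '(') :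
    (repP x new t).head? ≠ some '(' := by
  cases t with
  | nil => simp [repP]
  | cons c t =>
    rw [repP]
    by_cases hc : c = x ∧ t.head? = some '('
    · rw [if_pos hc]
      cases new with
      | nil => exact absurd rfl hne
      | cons n ns => simpa using hnew
    · rw [if_neg hc]
      simpa using ht

-- the composed four passes of A
def pipe (l : List Char) : List Char :=
  repP 'A' "NeuAc(".toList (repP 'F' "Fuc(".toList
    (repP 'N' "HexNAc(".toList (repP 'H' "Hex(".toList l)))

lemma head_pipe3_ne (t : List Char) (ht : t.head? ≠ some '(') :
    (repP 'F' "Fuc(".toList (repP 'N' "HexNAc(".toList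
      (repP 'H' "Hex(".toList t))).head? ≠ some '(' := by
  apply repP_head_ne _ _ _ (by decide) (by decide)
  apply repP_head_ne _ _ _ (by decide) (by decide)
  exact repP_head_ne _ _ _ (by decide) (by decide) ht

lemma get?_sugar_none (c : Char) (r : List Char)
    (h : ¬ ((c = 'H' ∨ c = 'N' ∨ c = 'F' ∨ c = 'A') ∧ r.head? = some '(')) :
    sugarNames.get? (c :: r.take 1) = none := by
  push Not at h
  cases r with
  | nil => simp [sugarNames, PySem.Dict.get?]
  | cons d r' =>
    by_cases hd : d = '('
    · subst hd
      have hc : ¬ (c = 'H' ∨ c = 'N' ∨ c = 'F' ∨ c = 'A') := fun hl => (h hl) (by simp)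
      push Not at hc
      simp [sugarNames, PySem.Dict.get?, Ne.symm hc.1,
        Ne.symm hc.2.1, Ne.symm hc.2.2.1, Ne.symm hc.2.2.2]
    · simp [sugarNames, PySem.Dict.get?, Ne.symm hd]

lemma pipe_eq_scan : ∀ (l : List Char), pipe l = renameScan l := by
  intro l
  induction hn : l.length using Nat.strong_induction_on generalizing l with
  | _ n ih =>
  subst hn
  cases l with
  | nil => rw [pipe]; rw [renameScan]; simp [repP]
  | cons c t =>
    by_cases hpat : (c = 'H' ∨ c = 'N' ∨ c = 'F' ∨ c = 'A') ∧ t.head? = some '('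
    · obtain ⟨hc, hhd⟩ := hpat
      obtain ⟨t', rfl⟩ : ∃ t', t = '(' :: t' := by
        cases t with
        | nil => simp at hhd
        | cons d t' => simp at hhd; exact ⟨t', by rw [hhd]⟩
      have iht : pipe t' = renameScan t' := ih t'.length (by simp) t' rfl
      rcases hc with rfl | rfl | rfl | rfl
      · have hg : sugarNames.get? ('H' :: ('(' :: t').take 1) = some "Hex(".toList := by
          simp [sugarNames, PySem.Dict.get?_mk_cons]
        rw [renameScan, hg]
        show pipe ('H' :: '(' :: t') = "Hex(".toList ++ renameScan (List.drop 1 ('(' :: t'))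
        simp only [List.drop_succ_cons, List.drop_zero]
        rw [← iht]
        simp only [pipe]
        rw [repP]; simp [repP]
      · have hg : sugarNames.get? ('N' :: ('(' :: t').take 1) = some "HexNAc(".toList := by
          simp [sugarNames, PySem.Dict.get?_mk_cons]
        rw [renameScan, hg]
        show pipe ('N' :: '(' :: t') = "HexNAc(".toList ++ renameScan (List.drop 1 ('(' :: t'))
        simp only [List.drop_succ_cons, List.drop_zero]
        rw [← iht]
        simp only [pipe]
        rw [repP]; simp [repP]
      · have hg : sugarNames.get? ('F' :: ('(' :: t').take 1) = some "Fuc(".toList := by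
          simp [sugarNames, PySem.Dict.get?_mk_cons]
        rw [renameScan, hg]
        show pipe ('F' :: '(' :: t') = "Fuc(".toList ++ renameScan (List.drop 1 ('(' :: t'))
        simp only [List.drop_succ_cons, List.drop_zero]
        rw [← iht]
        simp only [pipe]
        rw [repP]; simp [repP]
      · have hg : sugarNames.get? ('A' :: ('(' :: t').take 1) = some "NeuAc(".toList := by
          simp [sugarNames, PySem.Dict.get?_mk_cons]
        rw [renameScan, hg]
        show pipe ('A' :: '(' :: t') = "NeuAc(".toList ++ renameScan (List.drop 1 ('(' :: t'))
        simp only [List.drop_succ_cons, List.drop_zero]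
        rw [← iht]
        simp only [pipe]
        rw [repP]; simp [repP]
    · have iht : pipe t = renameScan t := ih t.length (by simp) t rfl
      rw [renameScan, get?_sugar_none c t hpat]
      rw [← iht]
      push Not at hpat
      simp only [pipe]
      have hH : repP 'H' "Hex(".toList (c :: t) = c :: repP 'H' "Hex(".toList t := by
        rw [repP, if_neg (by intro ⟨h1, h2⟩; exact absurd h2 (hpat (by simp [h1])))]
      rw [hH]
      have htH : (repP 'H' "Hex(".toList t).head? ≠ some '(' ∨
          (c ≠ 'N' ∧ c ≠ 'F' ∧ c ≠ 'A') := by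
        by_cases hlet : c = 'H' ∨ c = 'N' ∨ c = 'F' ∨ c = 'A'
        · exact Or.inl (repP_head_ne _ _ _ (by decide) (by decide) (hpat hlet))
        · push Not at hlet; exact Or.inr ⟨hlet.2.1, hlet.2.2.1, hlet.2.2.2⟩
      have hN : repP 'N' "HexNAc(".toList (c :: repP 'H' "Hex(".toList t)
          = c :: repP 'N' "HexNAc(".toList (repP 'H' "Hex(".toList t) := by
        rw [repP]
        rcases htH with hh | hh
        · rw [if_neg (by intro ⟨_, h2⟩; exact hh h2)]
        · rw [if_neg (by intro ⟨h1, _⟩; exact hh.1 h1)]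
      rw [hN]
      have htN : (repP 'N' "HexNAc(".toList (repP 'H' "Hex(".toList t)).head? ≠ some '(' ∨
          (c ≠ 'F' ∧ c ≠ 'A') := by
        by_cases hlet : c = 'H' ∨ c = 'N' ∨ c = 'F' ∨ c = 'A'
        · exact Or.inl (repP_head_ne _ _ _ (by decide) (by decide)
            (repP_head_ne _ _ _ (by decide) (by decide) (hpat hlet)))
        · push Not at hlet; exact Or.inr ⟨hlet.2.2.1, hlet.2.2.2⟩
      have hF : repP 'F' "Fuc(".toList (c :: repP 'N' "HexNAc(".toList (repP 'H' "Hex(".toList t))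
          = c :: repP 'F' "Fuc(".toList (repP 'N' "HexNAc(".toList (repP 'H' "Hex(".toList t)) := by
        rw [repP]
        rcases htN with hh | hh
        · rw [if_neg (by intro ⟨_, h2⟩; exact hh h2)]
        · rw [if_neg (by intro ⟨h1, _⟩; exact hh.1 h1)]
      rw [hF]
      have htF : (repP 'F' "Fuc(".toList (repP 'N' "HexNAc(".toList
          (repP 'H' "Hex(".toList t))).head? ≠ some '(' ∨ c ≠ 'A' := by
        by_cases hlet : c = 'H' ∨ c = 'N' ∨ c = 'F' ∨ c = 'A'
        · exact Or.inl (head_pipe3_ne t (hpat hlet))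
        · push Not at hlet; exact Or.inr hlet.2.2.2
      rw [repP]
      rcases htF with hh | hh
      · rw [if_neg (by intro ⟨_, h2⟩; exact hh h2)]
      · rw [if_neg (by intro ⟨h1, _⟩; exact hh h1)]

-- ===== VERDICT (by name: the statement is the Claim_ definition above) =====
theorem rename_sugars_spec : Claim_equal_rename_sugars := by
  intro comp _
  unfold Spec_rename_sugars rename_sugars rename_sugars_alt
  simp only [PySem.Str.replace]
  apply congrArg
  rw [← pipe_eq_scan]
  simp only [String.toList_ofList, pipe]
  rw [show ("H(".toList) = ['H', '('] from rfl, show ("N(".toList) = ['N', '('] from rfl,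
    show ("F(".toList) = ['F', '('] from rfl, show ("A(".toList) = ['A', '('] from rfl]
  rw [replace_eq_repP, replace_eq_repP, replace_eq_repP, replace_eq_repP]
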